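-- pv_equiv track=rewrite | github.com/micchyboy237/jet_python_modules | jet/code/markdown_utils/_preprocessors.py | process_separator_lines
-- ===== SOURCE A (Python) =====
-- from typing import Dict, List, Optional, Set, Tuple, TypedDict
--
-- def process_separator_lines(md_content: str) -> str:
--     """
--     Process markdown content to handle lines with only '-' or '*', moving next line's text to the right
--     with a single space, or removing the separator if no text follows.
--
--     Args:
--         md_content: Raw markdown content as a string.
--
--     Returns:
--         Processed markdown content with transformed separator lines.
--     """
--     lines = md_content.splitlines()
--     result: List[str] = []
--     i = 0
--
--     while i < len(lines):
--         current_line = lines[i].strip()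
--         if current_line in ("-", "*"):
--             # Check if there's a next line
--             if i + 1 < len(lines):
--                 next_line = lines[i + 1].strip()
--                 if next_line:
--                     # Combine separator and next line text
--                     result.append(f"{current_line} {next_line}")
--                     i += 2  # Skip the next line
--                 else:
--                     # No text in next line, skip the separator
--                     i += 1
--             else:
--                 # Separator is the last line, skip it
--                 i += 1
--         else:
--             # Preserve non-separator lines
--             result.append(lines[i])
--             i += 1
--
--     # Join lines, preserving original line endings
--     return "\n".join(result)
-- ===== SOURCE B (Python) =====
-- def process_separator_lines(md_content: str) -> str:
--     """Single forward pass carrying a pending-separator state instead of index lookahead."""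
--     result = []
--     pending = None
--     for line in md_content.splitlines():
--         if pending is not None:
--             text = line.strip()
--             result.append(f"{pending} {text}" if text else line)
--             pending = None
--         else:
--             stripped = line.strip()
--             if stripped in ("-", "*"):
--                 pending = stripped
--             else:
--                 result.append(line)
--     return "\n".join(result)
-- ===== Notes on version B (the rewrite author's own statement) =====
-- stated objective: simpler
-- what changed: Replaced the index-based while loop with 1-or-2 lookahead skipping by a single forward for-loop over the lines carrying a pending-separator state that is combined with the next line or dropped.
import Mathlib
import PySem

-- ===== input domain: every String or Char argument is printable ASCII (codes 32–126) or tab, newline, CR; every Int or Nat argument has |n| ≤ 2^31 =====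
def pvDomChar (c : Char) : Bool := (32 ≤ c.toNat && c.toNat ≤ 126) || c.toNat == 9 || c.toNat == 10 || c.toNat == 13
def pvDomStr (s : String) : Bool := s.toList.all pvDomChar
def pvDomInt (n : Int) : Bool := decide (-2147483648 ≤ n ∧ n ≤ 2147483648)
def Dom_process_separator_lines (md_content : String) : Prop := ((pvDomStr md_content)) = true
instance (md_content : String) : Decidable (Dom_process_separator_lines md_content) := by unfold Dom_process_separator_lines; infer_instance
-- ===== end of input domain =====

-- B replaces A's index-based lookahead loop with a single pass carrying a pending-separator state (simpler decomposition, same cost).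

-- ===== PORT A =====
-- A's while loop over index i (advancing by 1 or 2) as structural recursion on the suffix of lines.
def pvGoA : List String → List String
  | [] => []
  | l :: rest =>
    let c := PySem.Str.strip l
    if c = "-" ∨ c = "*" then
      match rest with
      | [] => []                                   -- separator is the last line: skip it
      | n :: rest' =>
        let ns := PySem.Str.strip n
        if ns ≠ "" then (c ++ " " ++ ns) :: pvGoA rest'   -- combine, skip next line
        else pvGoA (n :: rest')                           -- skip only the separator
    else l :: pvGoA rest
  termination_by ls => ls.length
  decreasing_by all_goals simp

def process_separator_lines (md_content : String) : String :=
  PySem.Str.join "\n" (pvGoA (PySem.Str.splitlines md_content))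

-- ===== PORT B =====
-- B's single pass with a pending-separator state.
def pvGoB : Option String → List String → List String
  | _, [] => []                                    -- drop any still-pending separator
  | some p, l :: rest =>
      (if PySem.Str.strip l ≠ "" then p ++ " " ++ PySem.Str.strip l else l) :: pvGoB none rest
  | none, l :: rest =>
      let s := PySem.Str.strip l
      if s = "-" ∨ s = "*" then pvGoB (some s) rest
      else l :: pvGoB none rest

def process_separator_lines_alt (md_content : String) : String :=
  PySem.Str.join "\n" (pvGoB none (PySem.Str.splitlines md_content))

-- ===== PRECONDITION & SPEC =====
def Spec_process_separator_lines (md_content : String) (out : String) : Prop := out = process_separator_lines_alt md_content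
instance (md_content : String) (out : String) : Decidable (Spec_process_separator_lines md_content out) := by unfold Spec_process_separator_lines; infer_instance

-- ===== CLAIM (what is proved, stated in full; the proofs are below) =====
def Claim_equal_process_separator_lines : Prop := ∀ (md_content : String), Dom_process_separator_lines md_content → Spec_process_separator_lines md_content (process_separator_lines md_content)

-- ===== LEMMAS AND PROOFS =====
theorem pvGoB_none_eq_pvGoA (ls : List String) : pvGoB none ls = pvGoA ls := by
  induction ls using pvGoA.induct with
  | case1 => simp [pvGoA, pvGoB]
  | case2 l c hsep =>
      have h : PySem.Str.strip l = "-" ∨ PySem.Str.strip l = "*" := hsep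
      simp [pvGoA, pvGoB, h]
  | case3 l c hsep n rest' ns hne ih =>
      have h : PySem.Str.strip l = "-" ∨ PySem.Str.strip l = "*" := hsep
      have h2 : PySem.Str.strip n ≠ "" := hne
      simp [pvGoA, pvGoB, h, h2, ih]
  | case4 l c hsep n rest' ns hemp ih =>
      -- strip n = "": A re-processes the blank line as an ordinary line; B emits it and clears the state
      have h : PySem.Str.strip l = "-" ∨ PySem.Str.strip l = "*" := hsep
      have h2 : PySem.Str.strip n = "" := by
        have := hemp; simp only [ns, not_not] at this; exact this
      simp only [pvGoB, h2] at ih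
      simp [pvGoA, pvGoB, h, h2] at ih ⊢
      exact ih
  | case5 l rest c hsep ih =>
      have h : ¬ (PySem.Str.strip l = "-" ∨ PySem.Str.strip l = "*") := hsep
      cases rest with
      | nil => simp [pvGoA, pvGoB, h]
      | cons n rest' => simpa [pvGoA, pvGoB, h] using ih

-- ===== VERDICT (by name: the statement is the Claim_ definition above) =====
theorem process_separator_lines_spec : Claim_equal_process_separator_lines := by
  intro md _
  unfold Spec_process_separator_lines process_separator_lines process_separator_lines_alt
  rw [pvGoB_none_eq_pvGoA]
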